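-- pv_equiv track=rewrite | github.com/AaPaul/Data-Structure-Algorithms | LeetCode/Practice_for_interview/Contest/266/2062.py | countVowelSubstrings2
-- ===== SOURCE A (Python) =====
-- def countVowelSubstrings2(word: str) -> int:
--     '''
--     i: current position
--     j: the start position of vowel substring
--     k: the window between k-1 and i is the smallest window including 5 vowels('aeiou')
--     cnt: the number of required substring
--
--     k-j is the number of required substring in i position
--     '''
--     m = {'a':0, 'e':0, 'i':0, 'o':0, 'u':0}
--
--     j = k = cnt = vow = 0
--     n = len(word)
--     for i in range(n):
--         if word[i] in m.keys():
--             m[word[i]] += 1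
--             vow += m[word[i]] == 1
--
--             while vow == 5:
--                 m[word[k]] -= 1
--                 vow -= m[word[k]] == 0
--                 k += 1
--             cnt += k - j
--
--         else:
--             for c in 'aeiou':
--                 m[c] = 0
--             vow = 0
--             j = k = i+1
--     return cnt
-- ===== SOURCE B (Python) =====
-- def countVowelSubstrings2(word: str) -> int:
--     # Nested double scan: for each start i, extend j while characters are vowels,
--     # tracking the set of vowels seen; each time all five are present, count one substring.
--     n = len(word)
--     total = 0
--     for i in range(n):
--         seen = set()
--         for j in range(i, n):
--             c = word[j]
--             if c not in 'aeiou':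
--                 break
--             seen.add(c)
--             if len(seen) == 5:
--                 total += 1
--     return total
-- ===== Notes on version B (the rewrite author's own statement) =====
-- stated objective: alternative
-- what changed: Replaces the single-pass sliding window (dict of vowel counts, monotone shrink pointer) with a nested double scan: for each start index, extend forward while characters are vowels, tracking the set of vowels seen, counting each position where all five are present.
import Mathlib
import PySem

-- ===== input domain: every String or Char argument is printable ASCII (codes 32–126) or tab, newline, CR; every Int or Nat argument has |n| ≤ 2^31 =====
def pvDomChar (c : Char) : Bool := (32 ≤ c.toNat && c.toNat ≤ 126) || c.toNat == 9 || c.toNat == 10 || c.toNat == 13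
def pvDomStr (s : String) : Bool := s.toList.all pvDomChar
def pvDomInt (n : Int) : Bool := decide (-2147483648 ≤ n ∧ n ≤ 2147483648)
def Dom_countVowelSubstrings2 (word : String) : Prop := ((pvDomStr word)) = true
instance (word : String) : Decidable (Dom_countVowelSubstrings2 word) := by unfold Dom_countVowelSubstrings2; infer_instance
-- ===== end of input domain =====

-- B replaces A's single-pass sliding window by a nested double scan over start positions;
-- same return value, no speed claim (B is quadratic on long vowel runs).

-- ===== PORT A =====
-- the inner `while vow == 5` loop; fuel merely makes it total (we prove word.length + 1 always suffices)
def cvsShrink (l : List Char) (fuel : Nat) (m : PySem.Dict Char Int) (vow k : Int) :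
    PySem.Dict Char Int × Int × Int :=
  match fuel with
  | 0 => (m, vow, k)
  | fuel + 1 =>
    if vow == 5 then
      let c := PySem.List.pyGetD l k ' '
      let m' := m.modify c 0 (· - 1)
      let vow' := vow - (if m'.getD c 0 == 0 then 1 else 0)
      cvsShrink l fuel m' vow' (k + 1)
    else (m, vow, k)

def countVowelSubstrings2 (word : String) : Int :=
  let l := word.toList
  let n : Int := PySem.Str.len word
  let st := (PySem.List.pyRange 0 n 1).foldl
    (fun (st : PySem.Dict Char Int × Int × Int × Int × Int) i =>
      let (m, j, k, cnt, vow) := st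
      let c := PySem.List.pyGetD l i ' '
      if m.contains c then
        let m1 := m.modify c 0 (· + 1)
        let vow1 := vow + (if m1.getD c 0 == 1 then 1 else 0)
        let r := cvsShrink l (l.length + 1) m1 vow1 k
        (r.1, j, r.2.2, cnt + (r.2.2 - j), r.2.1)
      else
        let m1 := (['a', 'e', 'i', 'o', 'u'] : List Char).foldl (fun d c' => d.insert c' 0) m
        (m1, i + 1, i + 1, cnt, 0))
    (PySem.Dict.ofList [('a', (0 : Int)), ('e', 0), ('i', 0), ('o', 0), ('u', 0)], 0, 0, 0, 0)
  st.2.2.2.1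

-- ===== PORT B =====
-- the inner `for j in range(i, n)` loop of B, walking the suffix word[i:], breaking at a non-vowel
def cvsInner (s : List Char) (seen : PySem.Set Char) (total : Int) : Int :=
  match s with
  | [] => total
  | c :: rest =>
    if ("aeiou".toList).contains c then
      let seen' := PySem.Set.add seen c
      cvsInner rest seen' (if PySem.Set.len seen' == 5 then total + 1 else total)
    else total

def countVowelSubstrings2_alt (word : String) : Int :=
  let l := word.toList
  (List.range l.length).foldl (fun total i => cvsInner (l.drop i) PySem.Set.empty total) 0

-- ===== PRECONDITION & SPEC =====
def Spec_countVowelSubstrings2 (word : String) (out : Int) : Prop := out = countVowelSubstrings2_alt word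
instance (word : String) (out : Int) : Decidable (Spec_countVowelSubstrings2 word out) := by unfold Spec_countVowelSubstrings2; infer_instance

-- ===== CLAIM (what is proved, stated in full; the proofs are below) =====
def Claim_equal_countVowelSubstrings2 : Prop := ∀ (word : String), Dom_countVowelSubstrings2 word → Spec_countVowelSubstrings2 word (countVowelSubstrings2 word)

-- ===== LEMMAS AND PROOFS =====

-- vocabulary: vowels, windows of the input
def isV (c : Char) : Bool := c == 'a' || c == 'e' || c == 'i' || c == 'o' || c == 'u'
def allV (s : List Char) : Bool := s.all isV
def has5 (s : List Char) : Bool := s.contains 'a' && s.contains 'e' && s.contains 'i' && s.contains 'o' && s.contains 'u'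
def goodV (s : List Char) : Bool := allV s && has5 s
def subL (l : List Char) (a b : Nat) : List Char := (l.take b).drop a
def indB (b : Bool) : Int := if b then 1 else 0
def vowSpec (s : List Char) : Int := indB (s.contains 'a') + indB (s.contains 'e') + indB (s.contains 'i') + indB (s.contains 'o') + indB (s.contains 'u')
def endCnt (l : List Char) (e : Nat) : Nat := (List.range (e+1)).countP (fun a => goodV (subL l a (e+1)))
def startCnt (l : List Char) (a : Nat) : Nat := (List.range (l.length - a)).countP (fun m => goodV (subL l a (a+m+1)))
def cntSpec (l : List Char) (i : Nat) : Nat := ((List.range i).map (endCnt l)).sum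

lemma subL_nil (l : List Char) (a b : Nat) (h : b ≤ a) : subL l a b = [] := by
  apply List.drop_eq_nil_of_le; simp [List.length_take]; omega

lemma subL_split (l : List Char) (a a' b : Nat) (h1 : a ≤ a') (h2 : a' ≤ b) (h3 : b ≤ l.length) :
    subL l a b = subL l a a' ++ subL l a' b := by
  unfold subL
  have ht : l.take a' = (l.take b).take a' := by rw [List.take_take, Nat.min_eq_left h2]
  rw [ht]
  conv_lhs => rw [← List.take_append_drop a' (l.take b)]
  rw [List.drop_append_of_le_length]
  simp [List.length_take]; omega

lemma subL_snoc (l : List Char) (a i : Nat) (h1 : a ≤ i) (h2 : i < l.length) :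
    subL l a (i+1) = subL l a i ++ [l[i]] := by
  unfold subL
  rw [List.take_add_one, List.drop_append_of_le_length (by simp [List.length_take]; omega)]
  simp [List.getElem?_eq_getElem h2]

lemma subL_cons (l : List Char) (k b : Nat) (h1 : k < b) (h2 : k < l.length) :
    subL l k b = l[k] :: subL l (k+1) b := by
  unfold subL
  rw [List.drop_eq_getElem_cons (by simp [List.length_take]; omega)]
  congr 1
  exact List.getElem_take

lemma getElem_mem_subL (l : List Char) (a b t : Nat) (h1 : a ≤ t) (h2 : t < b) (h3 : b ≤ l.length) :
    l[t]'(by omega) ∈ subL l a b := by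
  rw [subL_split l a t b h1 (by omega) h3, subL_cons l t b h2 (by omega)]
  simp

lemma allV_restrict (l : List Char) (a a' b : Nat) (h1 : a ≤ a') (h2 : a' ≤ b) (h3 : b ≤ l.length)
    (h : allV (subL l a b) = true) : allV (subL l a' b) = true := by
  rw [subL_split l a a' b h1 h2 h3] at h; simp [allV] at h ⊢; exact h.2

lemma has5_widen (l : List Char) (a a' b : Nat) (h1 : a ≤ a') (h2 : a' ≤ b) (h3 : b ≤ l.length)
    (h : has5 (subL l a' b) = true) : has5 (subL l a b) = true := by
  rw [subL_split l a a' b h1 h2 h3]; simp [has5] at h ⊢; tauto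

lemma vowSpec_nil : vowSpec [] = 0 := by simp [vowSpec, indB]

lemma vowSpec_eq_five_iff (s : List Char) : vowSpec s = 5 ↔ has5 s = true := by
  simp only [vowSpec, indB, has5, Bool.and_eq_true]
  split_ifs <;> simp_all

lemma vowSpec_snoc (s : List Char) (c : Char) (hc : isV c = true) :
    vowSpec (s ++ [c]) = vowSpec s + indB (!s.contains c) := by
  simp only [isV, Bool.or_eq_true, beq_iff_eq] at hc
  rcases hc with (((h|h)|h)|h)|h <;> subst h <;>
    simp only [vowSpec, indB, List.contains_append, List.contains_cons, List.contains_nil] <;>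
    cases ha : s.contains 'a' <;> cases he : s.contains 'e' <;> cases hi : s.contains 'i' <;>
      cases ho : s.contains 'o' <;> cases hu : s.contains 'u' <;> simp

lemma vowSpec_cons (s : List Char) (c : Char) (hc : isV c = true) :
    vowSpec (c :: s) = vowSpec s + indB (!s.contains c) := by
  simp only [isV, Bool.or_eq_true, beq_iff_eq] at hc
  rcases hc with (((h|h)|h)|h)|h <;> subst h <;>
    simp only [vowSpec, indB, List.contains_cons] <;>
    cases ha : s.contains 'a' <;> cases he : s.contains 'e' <;> cases hi : s.contains 'i' <;>
      cases ho : s.contains 'o' <;> cases hu : s.contains 'u' <;> simp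

lemma count_zero_of_not_isV (s : List Char) (d : Char) (hs : allV s = true) (hd : isV d = false) :
    s.count d = 0 := by
  rw [List.count_eq_zero]
  intro hm
  simp [allV, List.all_eq_true] at hs
  exact absurd (hs d hm) (by simp [hd])

lemma countP_range_card (k : Nat) (p : Nat → Bool) :
    (List.range k).countP p = ((Finset.range k).filter (fun x => p x = true)).card := by
  simp [List.countP_eq_length_filter, Finset.filter, Finset.range, Multiset.range]

-- a set of vowels has size 5 iff it has all five vowels
lemma setlen5 (q : List Char) (hq : allV q = true) :
    (PySem.Set.len (PySem.Set.ofList q) == 5) = has5 q := by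
  have hnd := PySem.Set.nodup_ofList q
  have hmem : ∀ x, x ∈ PySem.Set.ofList q ↔ x ∈ q := fun x => PySem.Set.mem_ofList q x
  have hsub : (PySem.Set.ofList q).toFinset ⊆ ({'a','e','i','o','u'} : Finset Char) := by
    intro x hx
    rw [List.mem_toFinset, hmem] at hx
    simp only [allV, List.all_eq_true] at hq
    have := hq x hx
    simp only [isV, Bool.or_eq_true, beq_iff_eq] at this
    simp [Finset.mem_insert]
    tauto
  have hcard : (PySem.Set.ofList q).toFinset.card = (PySem.Set.ofList q).length :=
    List.toFinset_card_of_nodup hnd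
  have h5 : ({'a','e','i','o','u'} : Finset Char).card = 5 := by decide
  have key : (PySem.Set.ofList q).length = 5 ↔ has5 q = true := by
    constructor
    · intro hlen
      have : (PySem.Set.ofList q).toFinset = ({'a','e','i','o','u'} : Finset Char) := by
        apply Finset.eq_of_subset_of_card_le hsub
        omega
      have hall : ∀ v ∈ ({'a','e','i','o','u'} : Finset Char), v ∈ q := by
        intro v hv
        rw [← hmem, ← List.mem_toFinset, this]
        exact hv
      simp only [has5, Bool.and_eq_true, List.contains_eq_mem, decide_eq_true_eq]
      refine ⟨⟨⟨⟨?_, ?_⟩, ?_⟩, ?_⟩, ?_⟩ <;> apply hall <;> decide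
    · intro hh
      simp only [has5, Bool.and_eq_true, List.contains_eq_mem, decide_eq_true_eq] at hh
      have hsup : ({'a','e','i','o','u'} : Finset Char) ⊆ (PySem.Set.ofList q).toFinset := by
        intro v hv
        rw [List.mem_toFinset, hmem]
        simp [Finset.mem_insert] at hv
        rcases hv with h|h|h|h|h <;> subst h <;> tauto
      have heq := Finset.Subset.antisymm hsub hsup
      rw [← hcard, heq, h5]
  rcases hhh : has5 q
  · rw [hhh] at key
    simp only [PySem.Set.len, beq_eq_false_iff_ne, ne_eq]
    simp only [Bool.false_eq_true, iff_false] at key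
    exact fun h => key (by exact_mod_cast h)
  · rw [hhh] at key
    simp only [PySem.Set.len, beq_iff_eq]
    have : (PySem.Set.ofList q).length = 5 := key.mpr rfl
    exact_mod_cast this

-- the inner while loop of A advances k to the least start whose window misses a vowel
lemma cvsShrink_spec (l : List Char) (i : Nat) (hi : i < l.length) :
    ∀ (fuel kN : Nat) (m : PySem.Dict Char Int),
      i + 1 ≤ fuel + kN → kN ≤ i + 1 →
      (∀ c, m.contains c = isV c) →
      (∀ c, m.getD c 0 = ((subL l kN (i+1)).count c : Int)) →
      allV (subL l kN (i+1)) = true →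
      ∃ kN' : Nat,
        (cvsShrink l fuel m (vowSpec (subL l kN (i+1))) (kN : Int)).2.2 = (kN' : Int) ∧
        (cvsShrink l fuel m (vowSpec (subL l kN (i+1))) (kN : Int)).2.1 = vowSpec (subL l kN' (i+1)) ∧
        (∀ c, (cvsShrink l fuel m (vowSpec (subL l kN (i+1))) (kN : Int)).1.contains c = isV c) ∧
        (∀ c, (cvsShrink l fuel m (vowSpec (subL l kN (i+1))) (kN : Int)).1.getD c 0 = ((subL l kN' (i+1)).count c : Int)) ∧
        kN ≤ kN' ∧ kN' ≤ i + 1 ∧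
        has5 (subL l kN' (i+1)) = false ∧
        (kN' = kN ∨ has5 (subL l (kN'-1) (i+1)) = true) := by
  intro fuel
  induction fuel with
  | zero =>
    intro kN m hfuel hk hcon hcnt hall
    have hk' : kN = i + 1 := by omega
    subst hk'
    refine ⟨i+1, rfl, rfl, hcon, hcnt, le_rfl, le_rfl, ?_, Or.inl rfl⟩
    rw [subL_nil l _ _ le_rfl]
    rfl
  | succ fuel ih =>
    intro kN m hfuel hk hcon hcnt hall
    by_cases h5 : has5 (subL l kN (i+1)) = true
    · -- shrink one step
      have hv : (vowSpec (subL l kN (i+1)) == 5) = true := by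
        rw [beq_iff_eq]; exact (vowSpec_eq_five_iff _).mpr h5
      have hklt : kN < i + 1 := by
        by_contra hcon'
        push Not at hcon'
        rw [subL_nil l _ _ (by omega)] at h5
        simp [has5] at h5
      have hkl : kN < l.length := by omega
      have hc : PySem.List.pyGetD l (kN : Int) ' ' = l[kN]'hkl := by
        rw [PySem.List.pyGetD_natCast]
        exact List.getD_eq_getElem l ' ' hkl
      have hwin : subL l kN (i+1) = l[kN]'hkl :: subL l (kN+1) (i+1) := subL_cons l kN (i+1) hklt hkl
      have hcV : isV (l[kN]'hkl) = true := by
        rw [hwin] at hall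
        simp only [allV, List.all_cons, Bool.and_eq_true] at hall
        exact hall.1
      have hall' : allV (subL l (kN+1) (i+1)) = true := by
        rw [hwin] at hall
        simp only [allV, List.all_cons, Bool.and_eq_true] at hall
        exact hall.2
      have hm' : ∀ d, (m.modify (l[kN]'hkl) 0 (· - 1)).getD d 0 = ((subL l (kN+1) (i+1)).count d : Int) := by
        intro d
        rw [PySem.Dict.getD_modify]
        by_cases hd : d = l[kN]'hkl
        · subst hd
          rw [if_pos rfl, hcnt _, hwin, List.count_cons_self]
          push_cast
          ring
        · rw [if_neg hd, hcnt d, hwin, List.count_cons_of_ne (fun h => hd h.symm)]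
      have hcon' : ∀ d, (m.modify (l[kN]'hkl) 0 (· - 1)).contains d = isV d := by
        intro d
        rw [PySem.Dict.contains_modify, hcon d]
        cases hd : d == l[kN]'hkl
        · simp
        · simp only [Bool.true_or]
          rw [beq_iff_eq] at hd
          rw [hd, hcV]
      have hvow' : vowSpec (subL l kN (i+1))
            - (if (m.modify (l[kN]'hkl) 0 (· - 1)).getD (l[kN]'hkl) 0 == 0 then 1 else 0)
          = vowSpec (subL l (kN+1) (i+1)) := by
        rw [hm' (l[kN]'hkl)]
        rw [hwin, vowSpec_cons _ _ hcV]
        have : ((((subL l (kN+1) (i+1)).count (l[kN]'hkl) : Int)) == 0)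
            = !(subL l (kN+1) (i+1)).contains (l[kN]'hkl) := by
          cases hcc : (subL l (kN+1) (i+1)).contains (l[kN]'hkl)
          · simp only [List.contains_eq_mem] at hcc
            rw [List.count_eq_zero_of_not_mem (by simpa using hcc)]
            rfl
          · simp only [List.contains_eq_mem] at hcc
            have := List.count_pos_iff.mpr (by simpa using hcc)
            simp only [Bool.not_true, beq_eq_false_iff_ne, ne_eq]
            intro hzz
            omega
        rw [this]
        cases hcc : (subL l (kN+1) (i+1)).contains (l[kN]'hkl) <;> simp [indB]
      obtain ⟨kN', e1, e2, e3, e4, e5, e6, e7, e8⟩ :=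
        ih (kN+1) (m.modify (l[kN]'hkl) 0 (· - 1)) (by omega) (by omega) hcon' hm' hall'
      have hstep : cvsShrink l (fuel+1) m (vowSpec (subL l kN (i+1))) (kN : Int)
          = cvsShrink l fuel (m.modify (l[kN]'hkl) 0 (· - 1)) (vowSpec (subL l (kN+1) (i+1))) ((kN+1 : Nat) : Int) := by
        rw [cvsShrink]
        simp only [hv, if_true]
        rw [hc, hvow']
        norm_cast
      refine ⟨kN', ?_, ?_, ?_, ?_, by omega, e6, e7, ?_⟩
      · rw [hstep]; exact e1
      · rw [hstep]; exact e2
      · rw [hstep]; exact e3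
      · rw [hstep]; exact e4
      · rcases e8 with h | h
        · right
          rw [h]
          simpa using h5
        · right
          exact h
    · -- loop exits
      have hv : (vowSpec (subL l kN (i+1)) == 5) = false := by
        rw [beq_eq_false_iff_ne]
        intro hEq
        exact h5 ((vowSpec_eq_five_iff _).mp hEq)
      have hstop : cvsShrink l (fuel+1) m (vowSpec (subL l kN (i+1))) (kN : Int)
          = (m, vowSpec (subL l kN (i+1)), (kN : Int)) := by
        rw [cvsShrink]
        simp only [hv]
        rfl
      exact ⟨kN, by rw [hstop], by rw [hstop], by rw [hstop]; exact hcon, by rw [hstop]; exact hcnt,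
        le_rfl, hk, by simpa using h5, Or.inl rfl⟩

-- the invariant carried by A's main loop
def InvA (l : List Char) (i : Nat) (st : PySem.Dict Char Int × Int × Int × Int × Int) : Prop :=
  ∃ jN kN : Nat,
    st.2.1 = (jN : Int) ∧ st.2.2.1 = (kN : Int) ∧
    jN ≤ kN ∧ kN ≤ i ∧
    (∀ c, st.1.contains c = isV c) ∧
    (∀ c, st.1.getD c 0 = ((subL l kN i).count c : Int)) ∧
    allV (subL l jN i) = true ∧
    (jN = 0 ∨ isV (l.getD (jN-1) ' ') = false) ∧
    st.2.2.2.2 = vowSpec (subL l kN i) ∧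
    has5 (subL l kN i) = false ∧
    (kN = jN ∨ has5 (subL l (kN-1) i) = true) ∧
    st.2.2.2.1 = (cntSpec l i : Int)

lemma dict0_contains (c : Char) :
    (PySem.Dict.ofList [('a', (0 : Int)), ('e', 0), ('i', 0), ('o', 0), ('u', 0)]).contains c = isV c := by
  have h : PySem.Dict.ofList [('a', (0 : Int)), ('e', 0), ('i', 0), ('o', 0), ('u', 0)]
      = PySem.Dict.mk [('a', (0 : Int)), ('e', 0), ('i', 0), ('o', 0), ('u', 0)] := by decide
  rw [h]
  simp [pysem, isV]
  cases ha : c == 'a' <;> cases he : c == 'e' <;> cases hi : c == 'i' <;>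
    cases ho : c == 'o' <;> cases hu : c == 'u' <;> simp_all <;>
    exact ⟨fun h => ha h.symm, fun h => he h.symm, fun h => hi h.symm, fun h => ho h.symm,
      fun h => hu h.symm⟩

lemma dict0_getD (c : Char) :
    (PySem.Dict.ofList [('a', (0 : Int)), ('e', 0), ('i', 0), ('o', 0), ('u', 0)]).getD c 0 = 0 := by
  have h : PySem.Dict.ofList [('a', (0 : Int)), ('e', 0), ('i', 0), ('o', 0), ('u', 0)]
      = PySem.Dict.mk [('a', (0 : Int)), ('e', 0), ('i', 0), ('o', 0), ('u', 0)] := by decide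
  rw [h, PySem.Dict.getD_eq_get?_getD]
  simp [PySem.Dict.get?_mk_cons]
  split_ifs <;> rfl

lemma invA_init (l : List Char) :
    InvA l 0 (PySem.Dict.ofList [('a', (0 : Int)), ('e', 0), ('i', 0), ('o', 0), ('u', 0)], 0, 0, 0, 0) := by
  refine ⟨0, 0, rfl, rfl, le_rfl, le_rfl, dict0_contains, ?_, ?_, Or.inl rfl, ?_, ?_, Or.inl rfl, ?_⟩
  · intro c
    rw [dict0_getD, subL_nil l 0 0 le_rfl]
    simp
  · rw [subL_nil l 0 0 le_rfl]; rfl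
  · rw [subL_nil l 0 0 le_rfl, vowSpec_nil]
  · rw [subL_nil l 0 0 le_rfl]; rfl
  · simp [cntSpec]

lemma isV_of_mem_allV (s : List Char) (x : Char) (h : allV s = true) (hx : x ∈ s) : isV x = true := by
  simp only [allV, List.all_eq_true] at h
  exact h x hx

lemma has5_ext (s t : List Char) (h : has5 s = true) : has5 (s ++ t) = true := by
  simp only [has5, Bool.and_eq_true, List.contains_append, Bool.or_eq_true] at h ⊢
  tauto

lemma dictReset_contains (m : PySem.Dict Char Int) (hcon : ∀ c, m.contains c = isV c) (d : Char) :
    ((['a', 'e', 'i', 'o', 'u'] : List Char).foldl (fun d c' => d.insert c' 0) m).contains d = isV d := by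
  simp only [List.foldl_cons, List.foldl_nil]
  simp only [PySem.Dict.contains_insert, hcon d]
  cases ha : d == 'a' <;> cases he : d == 'e' <;> cases hi : d == 'i' <;>
    cases ho : d == 'o' <;> cases hu : d == 'u' <;> simp_all [isV]

lemma dictReset_getD (m : PySem.Dict Char Int) (d : Char) :
    ((['a', 'e', 'i', 'o', 'u'] : List Char).foldl (fun d c' => d.insert c' 0) m).getD d 0
      = if isV d = true then 0 else m.getD d 0 := by
  simp only [List.foldl_cons, List.foldl_nil]
  simp only [PySem.Dict.getD_insert, isV]
  by_cases ha : d = 'a' <;> by_cases he : d = 'e' <;> by_cases hi : d = 'i' <;>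
    by_cases ho : d = 'o' <;> by_cases hu : d = 'u' <;> simp_all

lemma invA_step (l : List Char) (i : Nat) (hi : i < l.length)
    (st : PySem.Dict Char Int × Int × Int × Int × Int) (h : InvA l i st) :
    InvA l (i+1)
      ((fun (st : PySem.Dict Char Int × Int × Int × Int × Int) (iI : Int) =>
        let (m, j, k, cnt, vow) := st
        let c := PySem.List.pyGetD l iI ' '
        if m.contains c then
          let m1 := m.modify c 0 (· + 1)
          let vow1 := vow + (if m1.getD c 0 == 1 then 1 else 0)
          let r := cvsShrink l (l.length + 1) m1 vow1 k
          (r.1, j, r.2.2, cnt + (r.2.2 - j), r.2.1)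
        else
          let m1 := (['a', 'e', 'i', 'o', 'u'] : List Char).foldl (fun d c' => d.insert c' 0) m
          (m1, iI + 1, iI + 1, cnt, 0)) st (i : Int)) := by
  obtain ⟨m, j, k, cnt, vow⟩ := st
  obtain ⟨jN, kN, hj, hk, hjk, hki, hcon, hcnt, hallj, hjbd, hvow, h5w, hdisj, hcv⟩ := h
  simp only at hj hk hcon hcnt hvow hcv
  subst hj hk hvow hcv
  have hc : PySem.List.pyGetD l (i : Int) ' ' = l[i]'hi := by
    rw [PySem.List.pyGetD_natCast]
    exact List.getD_eq_getElem l ' ' hi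
  have hil : i + 1 ≤ l.length := by omega
  have hallk : allV (subL l kN i) = true := allV_restrict l jN kN i hjk hki (by omega) hallj
  dsimp only
  rw [hc, hcon (l[i]'hi)]
  cases hcV : isV (l[i]'hi)
  · -- non-vowel: reset
    rw [if_neg (by simp)]
    refine ⟨i+1, i+1, by norm_cast, by norm_cast, le_rfl, le_rfl, ?_, ?_, ?_, ?_, ?_, ?_, Or.inl rfl, ?_⟩
    · intro d
      exact dictReset_contains m hcon d
    · intro d
      rw [dictReset_getD, subL_nil l (i+1) (i+1) le_rfl]
      by_cases hd : isV d = true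
      · simp [hd]
      · rw [if_neg hd, hcnt d, count_zero_of_not_isV _ _ hallk (by simpa using hd)]
        simp
    · rw [subL_nil l (i+1) (i+1) le_rfl]
      rfl
    · right
      rw [show i + 1 - 1 = i by omega, List.getD_eq_getElem l ' ' hi]
      exact hcV
    · rw [subL_nil l (i+1) (i+1) le_rfl, vowSpec_nil]
    · rw [subL_nil l (i+1) (i+1) le_rfl]
      rfl
    · have hend0 : endCnt l i = 0 := by
        rw [endCnt]
        apply List.countP_eq_zero.mpr
        intro a ha
        rw [List.mem_range] at ha
        have hmem : l[i]'hi ∈ subL l a (i+1) := getElem_mem_subL l a (i+1) i (by omega) (by omega) hil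
        simp only [goodV, Bool.and_eq_true]
        intro hcontr
        exact absurd (isV_of_mem_allV _ _ hcontr.1 hmem) (by simp [hcV])
      have : cntSpec l (i+1) = cntSpec l i := by
        rw [cntSpec, List.range_succ, List.map_append, List.sum_append]
        simp [hend0, cntSpec]
      rw [this]
  · -- vowel: extend window, shrink, count
    rw [if_pos rfl]
    have hwinsnoc : subL l kN (i+1) = subL l kN i ++ [l[i]'hi] := subL_snoc l kN i hki hi
    have hallj' : allV (subL l jN (i+1)) = true := by
      rw [subL_snoc l jN i (by omega) hi]
      simp only [allV, List.all_append, List.all_cons, List.all_nil, Bool.and_eq_true]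
      exact ⟨hallj, by simp [hcV]⟩
    have hallk' : allV (subL l kN (i+1)) = true := by
      rw [hwinsnoc]
      simp only [allV, List.all_append, List.all_cons, List.all_nil, Bool.and_eq_true]
      exact ⟨hallk, by simp [hcV]⟩
    have hm1 : ∀ d, (m.modify (l[i]'hi) 0 (· + 1)).getD d 0 = ((subL l kN (i+1)).count d : Int) := by
      intro d
      rw [PySem.Dict.getD_modify, hwinsnoc]
      by_cases hd : d = l[i]'hi
      · subst hd
        rw [if_pos rfl, hcnt _, List.count_append, List.count_singleton]
        push_cast
        simp
      · rw [if_neg hd, hcnt d, List.count_append, List.count_singleton']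
        rw [if_neg (fun hcontr => hd hcontr.symm)]
        push_cast
        ring
    have hcon1 : ∀ d, (m.modify (l[i]'hi) 0 (· + 1)).contains d = isV d := by
      intro d
      rw [PySem.Dict.contains_modify, hcon d]
      cases hd : d == l[i]'hi
      · simp
      · simp only [Bool.true_or]
        rw [beq_iff_eq] at hd
        rw [hd, hcV]
    have hvow1 : (vowSpec (subL l kN i)
          + if (m.modify (l[i]'hi) 0 (· + 1)).getD (l[i]'hi) 0 == 1 then 1 else 0)
        = vowSpec (subL l kN (i+1)) := by
      rw [hm1 (l[i]'hi), hwinsnoc, vowSpec_snoc _ _ hcV]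
      have hcount : (((subL l kN (i+1)).count (l[i]'hi) : Int) == 1)
          = !(subL l kN i).contains (l[i]'hi) := by
        rw [hwinsnoc, List.count_append, List.count_singleton]
        simp only [beq_self_eq_true, if_true]
        cases hcc : (subL l kN i).contains (l[i]'hi)
        · simp only [List.contains_eq_mem] at hcc
          rw [List.count_eq_zero_of_not_mem (by simpa using hcc)]
          simp
        · simp only [List.contains_eq_mem] at hcc
          have hpos := List.count_pos_iff.mpr (by simpa using hcc)
          simp only [Bool.not_true, beq_eq_false_iff_ne, ne_eq]
          intro hzz
          omega
      rw [← hwinsnoc, hcount]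
      cases hcc : (subL l kN i).contains (l[i]'hi) <;> simp [indB]
    rw [hvow1]
    obtain ⟨kN', e1, e2, e3, e4, e5, e6, e7, e8⟩ :=
      cvsShrink_spec l i hi (l.length + 1) kN (m.modify (l[i]'hi) 0 (· + 1))
        (by omega) (by omega) hcon1 hm1 hallk'
    have hiff : ∀ a, a < i + 1 → (goodV (subL l a (i+1)) = true ↔ jN ≤ a ∧ a < kN') := by
      intro a ha
      constructor
      · intro hg
        simp only [goodV, Bool.and_eq_true] at hg
        constructor
        · by_contra hcontr
          push Not at hcontr
          have hj1 : jN ≠ 0 := by omega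
          have hjlt : jN - 1 < l.length := by omega
          have hbd : isV (l.getD (jN-1) ' ') = false := by
            rcases hjbd with h0 | hbb
            · exact absurd h0 hj1
            · exact hbb
          rw [List.getD_eq_getElem l ' ' hjlt] at hbd
          have hmem : l[jN-1]'hjlt ∈ subL l a (i+1) :=
            getElem_mem_subL l a (i+1) (jN-1) (by omega) (by omega) hil
          exact absurd (isV_of_mem_allV _ _ hg.1 hmem) (by simp [hbd])
        · by_contra hcontr
          push Not at hcontr
          have := has5_widen l kN' a (i+1) hcontr (by omega) hil hg.2
          rw [this] at e7
          exact absurd e7 (by simp)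
      · intro ⟨ha1, ha2⟩
        simp only [goodV, Bool.and_eq_true]
        refine ⟨allV_restrict l jN a (i+1) ha1 (by omega) hil hallj', ?_⟩
        have hk5 : has5 (subL l (kN'-1) (i+1)) = true := by
          rcases e8 with hkk | hkk
          · rw [hkk]
            have hkj : kN ≠ jN := by omega
            rcases hdisj with hdd | hdd
            · exact absurd hdd hkj
            · rw [subL_snoc l (kN-1) i (by omega) hi]
              exact has5_ext _ _ hdd
          · exact hkk
        exact has5_widen l a (kN'-1) (i+1) (by omega) (by omega) hil hk5
    have hendc : endCnt l i = kN' - jN := by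
      have hfil : (Finset.range (i+1)).filter (fun a => goodV (subL l a (i+1)) = true)
          = Finset.Ico jN kN' := by
        ext a
        simp only [Finset.mem_filter, Finset.mem_range, Finset.mem_Ico]
        constructor
        · intro ⟨haa, hgg⟩
          exact (hiff a haa).mp hgg
        · intro haa
          exact ⟨by omega, (hiff a (by omega)).mpr haa⟩
      rw [endCnt, countP_range_card, hfil, Nat.card_Ico]
    refine ⟨jN, kN', rfl, e1, by omega, e6, e3, e4, hallj', hjbd, e2, e7, ?_, ?_⟩
    · rcases e8 with hkk | hkk
      · rcases hdisj with hdd | hdd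
        · exact Or.inl (by omega)
        · right
          rw [hkk, subL_snoc l (kN-1) i (by omega) hi]
          exact has5_ext _ _ hdd
      · exact Or.inr hkk
    · rw [e1]
      have : cntSpec l (i+1) = cntSpec l i + endCnt l i := by
        rw [cntSpec, List.range_succ, List.map_append, List.sum_append]
        simp [cntSpec]
      rw [this, hendc]
      push_cast [Nat.cast_sub (by omega : jN ≤ kN')]
      ring

lemma foldl_inv {σ : Type} (f : σ → Int → σ) (P : Nat → σ → Prop) (n : Nat) (init : σ)
    (h0 : P 0 init) (hstep : ∀ i s, i < n → P i s → P (i+1) (f s (i : Int))) :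
    P n (((List.range n).map (fun k : Nat => (k : Int))).foldl f init) := by
  induction n with
  | zero => simpa using h0
  | succ n ih =>
    rw [List.range_succ]
    simp only [List.map_append, List.foldl_append, List.map_cons, List.map_nil, List.foldl_cons, List.foldl_nil]
    exact hstep n _ (by omega) (ih (fun i s hi => hstep i s (by omega)))

-- A computes the end-indexed sum
lemma A_eq_cntSpec (word : String) :
    countVowelSubstrings2 word = (cntSpec word.toList word.toList.length : Int) := by
  have hn : PySem.Str.len word = (word.toList.length : Int) := by simp
  have h1 : countVowelSubstrings2 word
      = ((PySem.List.pyRange 0 (PySem.Str.len word) 1).foldl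
          (fun (st : PySem.Dict Char Int × Int × Int × Int × Int) (iI : Int) =>
            let (m, j, k, cnt, vow) := st
            let c := PySem.List.pyGetD word.toList iI ' '
            if m.contains c then
              let m1 := m.modify c 0 (· + 1)
              let vow1 := vow + (if m1.getD c 0 == 1 then 1 else 0)
              let r := cvsShrink word.toList (word.toList.length + 1) m1 vow1 k
              (r.1, j, r.2.2, cnt + (r.2.2 - j), r.2.1)
            else
              let m1 := (['a', 'e', 'i', 'o', 'u'] : List Char).foldl (fun d c' => d.insert c' 0) m
              (m1, iI + 1, iI + 1, cnt, 0))
          (PySem.Dict.ofList [('a', (0 : Int)), ('e', 0), ('i', 0), ('o', 0), ('u', 0)], 0, 0, 0, 0)).2.2.2.1 := rfl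
  rw [h1, hn, PySem.List.pyRange_zero_nat]
  have key := foldl_inv
      (f := (fun (st : PySem.Dict Char Int × Int × Int × Int × Int) (iI : Int) =>
            let (m, j, k, cnt, vow) := st
            let c := PySem.List.pyGetD word.toList iI ' '
            if m.contains c then
              let m1 := m.modify c 0 (· + 1)
              let vow1 := vow + (if m1.getD c 0 == 1 then 1 else 0)
              let r := cvsShrink word.toList (word.toList.length + 1) m1 vow1 k
              (r.1, j, r.2.2, cnt + (r.2.2 - j), r.2.1)
            else
              let m1 := (['a', 'e', 'i', 'o', 'u'] : List Char).foldl (fun d c' => d.insert c' 0) m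
              (m1, iI + 1, iI + 1, cnt, 0)))
      (P := fun i st => InvA word.toList i st)
      word.toList.length
      (PySem.Dict.ofList [('a', (0 : Int)), ('e', 0), ('i', 0), ('o', 0), ('u', 0)], 0, 0, 0, 0)
      (invA_init word.toList)
      (fun i s hi hP => invA_step word.toList i hi s hP)
  obtain ⟨jN, kN, _, _, _, _, _, _, _, _, _, _, _, hcnt⟩ := key
  exact hcnt

lemma aeiou_contains (c : Char) : (("aeiou".toList).contains c) = isV c := by
  have h : "aeiou".toList = ['a','e','i','o','u'] := rfl
  rw [h]
  simp only [isV, List.contains_cons, List.contains_nil, Bool.or_false]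
  cases ha : c == 'a' <;> cases he : c == 'e' <;> cases hi : c == 'i' <;>
    cases ho : c == 'o' <;> cases hu : c == 'u' <;> simp_all

-- B's inner loop counts the good prefixes of the suffix it walks
lemma cvsInner_spec (s : List Char) : ∀ (p : List Char) (total : Int), allV p = true →
    cvsInner s (PySem.Set.ofList p) total
      = total + ((List.range s.length).countP
          (fun m => allV (s.take (m+1)) && has5 (p ++ s.take (m+1))) : Int) := by
  induction s with
  | nil => intro p total hp; simp [cvsInner]
  | cons c rest ih =>
    intro p total hp
    rw [cvsInner, aeiou_contains]
    cases hc : isV c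
    · have hz : (List.range (c :: rest).length).countP
          (fun m => allV ((c :: rest).take (m+1)) && has5 (p ++ (c :: rest).take (m+1))) = 0 := by
        apply List.countP_eq_zero.mpr
        intro m _
        simp [List.take_succ_cons, allV, List.all_cons, hc]
      rw [hz]
      simp
    · have hadd : PySem.Set.add (PySem.Set.ofList p) c = PySem.Set.ofList (p ++ [c]) := by
        rw [PySem.Set.ofList_eq_foldl, PySem.Set.ofList_eq_foldl, List.foldl_append]
        rfl
      have hp' : allV (p ++ [c]) = true := by
        simp only [allV, List.all_append, Bool.and_eq_true, List.all_cons, List.all_nil,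
          Bool.and_true] at hp ⊢
        exact ⟨hp, hc⟩
      simp only [hadd, setlen5 _ hp', ih (p ++ [c]) _ hp']
      simp only [List.append_assoc, List.cons_append, List.nil_append]
      rw [List.length_cons, List.range_succ_eq_map, List.countP_cons, List.countP_map]
      have hcongr : (List.range rest.length).countP
            ((fun m => allV ((c :: rest).take (m+1)) && has5 (p ++ (c :: rest).take (m+1))) ∘ Nat.succ)
          = (List.range rest.length).countP
            (fun m => allV (rest.take (m+1)) && has5 (p ++ c :: rest.take (m+1))) := by
        apply List.countP_congr
        intro m _
        simp only [Function.comp_apply, List.take_succ_cons, allV, List.all_cons, hc,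
          Bool.true_and, List.append_assoc, List.cons_append, List.nil_append]
      have h0 : (allV ((c :: rest).take (0+1)) && has5 (p ++ (c :: rest).take (0+1))) = has5 (p ++ [c]) := by
        simp [List.take_succ_cons, allV, hc]
      rw [hcongr, h0]
      cases hh : has5 (p ++ [c]) <;> simp <;> try ring

lemma B_eq_sum (word : String) :
    countVowelSubstrings2_alt word
      = (((List.range word.toList.length).map (startCnt word.toList)).sum : Int) := by
  rw [show countVowelSubstrings2_alt word
      = (List.range word.toList.length).foldl
          (fun total i => cvsInner (word.toList.drop i) PySem.Set.empty total) 0 from rfl]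
  have hbody : ∀ (total : Int) (i : Nat), i ∈ List.range word.toList.length →
      cvsInner (word.toList.drop i) PySem.Set.empty total = total + (startCnt word.toList i : Int) := by
    intro total i hi
    rw [List.mem_range] at hi
    have he : (PySem.Set.empty : PySem.Set Char) = PySem.Set.ofList [] := rfl
    rw [he, cvsInner_spec _ [] total rfl]
    congr 1
    unfold startCnt
    rw [List.length_drop]
    norm_cast
    apply List.countP_congr
    intro m _
    simp only [List.nil_append]
    have : (word.toList.drop i).take (m+1) = subL word.toList i (i+m+1) := by
      rw [List.take_drop]
      unfold subL
      congr 2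
    rw [this]
    exact Iff.rfl
  rw [PySem.List.foldl_congr_mem' _ _
        (fun (total : Int) (i : Nat) => total + (startCnt word.toList i : Int)) _
        (fun x hx acc => hbody acc x hx)]
  rw [PySem.List.foldl_add]
  rw [Nat.cast_list_sum, List.map_map, zero_add]
  rfl

-- double counting: summing valid substrings by end position or by start position agree
lemma sum_swap_cnt (l : List Char) :
    cntSpec l l.length = ((List.range l.length).map (startCnt l)).sum := by
  have hlist : ∀ (f : Nat → Nat) (k : Nat), ((List.range k).map f).sum = ∑ i ∈ Finset.range k, f i := by
    intro f k
    induction k with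
    | zero => simp
    | succ k ih => rw [List.range_succ, List.map_append, List.sum_append, Finset.sum_range_succ, ih]; simp
  set n := l.length with hn
  set F : Nat → Nat → Nat :=
    fun a e => if a ≤ e ∧ goodV (subL l a (e+1)) = true then 1 else 0 with hF
  have hend : ∀ e ∈ Finset.range n, endCnt l e = ∑ a ∈ Finset.range n, F a e := by
    intro e he
    rw [Finset.mem_range] at he
    rw [endCnt, countP_range_card, Finset.card_filter]
    have h1 : ∑ a ∈ Finset.range (e+1), (if goodV (subL l a (e+1)) = true then 1 else 0)
        = ∑ a ∈ Finset.range (e+1), F a e := by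
      apply Finset.sum_congr rfl
      intro a ha
      rw [Finset.mem_range] at ha
      simp only [hF]
      by_cases hg : goodV (subL l a (e+1)) = true <;> simp [hg, (by omega : a ≤ e)]
    rw [h1]
    apply Finset.sum_subset
      (by intro x hx; rw [Finset.mem_range] at *; omega : Finset.range (e+1) ⊆ Finset.range n)
    intro a _ ha
    rw [Finset.mem_range] at ha
    simp only [hF]
    rw [if_neg (fun hcon => absurd hcon.1 (by omega : ¬ a ≤ e))]
  have hstart : ∀ a ∈ Finset.range n, startCnt l a = ∑ e ∈ Finset.range n, F a e := by
    intro a ha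
    rw [Finset.mem_range] at ha
    have hsub : Finset.Ico a n ⊆ Finset.range n := by
      intro x hx; rw [Finset.mem_Ico] at hx; rw [Finset.mem_range]; omega
    rw [startCnt, countP_range_card, Finset.card_filter, ← hn]
    rw [← Finset.sum_subset hsub (by
      intro e hee he
      rw [Finset.mem_range] at hee
      rw [Finset.mem_Ico] at he
      simp only [hF]
      rw [if_neg (fun hcon => absurd hcon.1 (by omega : ¬ a ≤ e))])]
    rw [Finset.sum_Ico_eq_sum_range]
    apply Finset.sum_congr rfl
    intro m hm
    rw [Finset.mem_range] at hm
    simp only [hF]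
    by_cases hg : goodV (subL l a (a+m+1)) = true
    · simp only [show a + (m + 1) = a + m + 1 by omega, hg]
      simp
    · simp only [show a + (m + 1) = a + m + 1 by omega, hg]
      simp
  rw [cntSpec, hlist, hlist]
  rw [Finset.sum_congr rfl hend, Finset.sum_congr rfl hstart]
  exact Finset.sum_comm

-- ===== VERDICT (by name: the statement is the Claim_ definition above) =====
theorem countVowelSubstrings2_spec : Claim_equal_countVowelSubstrings2 := by
  intro word _
  unfold Spec_countVowelSubstrings2
  rw [A_eq_cntSpec, B_eq_sum, sum_swap_cnt]
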